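-- pv_equiv track=rewrite | github.com/rbonvall/progra-utfsm | guias/2012-2/octubre-22/torneos.py | ordenar_equipos
-- ===== SOURCE A (Python) =====
-- def obtener_equipos(partidos):
--     equipos = set()
--     for local, visita in partidos:
--         equipos.add(local)
--         equipos.add(visita)
--     equipos = list(equipos)
--     equipos.sort()
--     return equipos
--
-- def calcular_puntos(partidos, equipo):
--     puntos = 0
--     for p in partidos:
--         _, resultado = partidos[p]
--         if resultado == None:
--             continue
--         local, visita = p
--         gl, gv = resultado
--         if equipo == local:
--             if gl > gv:
--                 puntos += 3
--             elif gl == gv: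
--                 puntos += 1
--         elif equipo == visita:
--             if gl < gv:
--                 puntos += 3
--             elif gl == gv:
--                 puntos += 1
--     return puntos
--
-- def calcular_diferencia(partidos, equipo):
--     diferencia = 0
--     for p in partidos:
--         _, resultado = partidos[p]
--         if resultado == None:
--             continue
--         gl, gv = resultado
--         local, visita = p
--         if equipo == local:
--             diferencia += (gl - gv)
--         elif equipo == visita:
--             diferencia += (gv - gl)
--     return diferencia
--
-- def ordenar_equipos(partidos):
--     equipos = obtener_equipos(partidos)
--     estadisticas = []
--     for equipo in equipos:
--         pts = calcular_puntos(partidos, equipo)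
--         dif = calcular_diferencia(partidos, equipo)
--         estadisticas.append((pts, dif, equipo))
--     estadisticas.sort()
--     estadisticas.reverse()
--
--     equipos_ordenados = []
--     for _, _, equipo in estadisticas:
--         equipos_ordenados.append(equipo)
--     return equipos_ordenados
-- ===== SOURCE B (Python) =====
-- def ordenar_equipos(partidos):
--     stats = {}
--     for (local, visita), (_, resultado) in partidos.items():
--         stats.setdefault(local, (0, 0))
--         stats.setdefault(visita, (0, 0))
--         if resultado is not None:
--             gl, gv = resultado
--             pl, dl = stats[local]
--             pv, dv = stats[visita]
--             if gl > gv: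
--                 pl += 3
--             elif gl < gv:
--                 pv += 3
--             else:
--                 pl += 1
--                 pv += 1
--             stats[local] = (pl, dl + gl - gv)
--             stats[visita] = (pv, dv + gv - gl)
--     return sorted(stats, key=lambda e: (stats[e][0], stats[e][1], e), reverse=True)
-- ===== Notes on version B (the rewrite author's own statement) =====
-- stated objective: faster
-- what changed: Instead of re-scanning the whole match dict once per team for points and once again for goal difference, B makes a single pass over the matches accumulating (points, diff) per team in a dict and then sorts the teams once by (points, diff, name) descending.
-- outside the precondition, e.g. on ordenar_equipos({('a', 'a'): (0, (0, 1)), ('a', 'b'): (0, None)}): A returns ['b', 'a'], B returns ['a', 'b']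
import Mathlib
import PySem

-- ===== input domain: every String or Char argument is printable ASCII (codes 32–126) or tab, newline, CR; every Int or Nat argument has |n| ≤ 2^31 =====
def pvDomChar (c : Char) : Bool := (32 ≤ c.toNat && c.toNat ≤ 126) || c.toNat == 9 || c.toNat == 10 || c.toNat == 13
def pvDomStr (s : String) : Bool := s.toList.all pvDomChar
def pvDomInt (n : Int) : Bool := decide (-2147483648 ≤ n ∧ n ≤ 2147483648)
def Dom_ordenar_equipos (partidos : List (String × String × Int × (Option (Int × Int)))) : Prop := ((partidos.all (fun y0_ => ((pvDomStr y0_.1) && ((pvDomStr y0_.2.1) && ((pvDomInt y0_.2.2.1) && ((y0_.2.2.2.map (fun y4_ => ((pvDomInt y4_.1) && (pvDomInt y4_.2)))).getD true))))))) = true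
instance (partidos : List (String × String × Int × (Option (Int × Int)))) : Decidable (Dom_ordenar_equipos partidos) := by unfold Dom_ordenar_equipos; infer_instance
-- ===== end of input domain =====

-- B replaces A's per-team rescans of the match dict (points and goal difference recomputed by
-- a full pass per team) with one accumulating pass over the matches and a single descending sort.


-- ===== PORT A =====
-- partidos is a Python dict {(local, visita): (fecha, resultado)} (assoc list, unique keys).

def obtener_equipos (partidos : List (String × String × Int × (Option (Int × Int)))) : List String :=
  let equipos : PySem.Set String :=
    partidos.foldl (fun s e => PySem.Set.add (PySem.Set.add s e.1) e.2.1) PySem.Set.empty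
  -- list(equipos); equipos.sort(): sorting the set's elements (no key, so hash order is irrelevant)
  PySem.List.sorted equipos (fun x => x) false

-- partidos[p]: dict lookup = first matching key in the assoc list
def pvLookupA (partidos : List (String × String × Int × (Option (Int × Int))))
    (p : String × String) : Option (Int × Option (Int × Int)) :=
  (partidos.find? (fun e => (e.1, e.2.1) == p)).map (fun e => e.2.2)

def calcular_puntos (partidos : List (String × String × Int × (Option (Int × Int))))
    (equipo : String) : Int :=
  partidos.foldl (fun puntos e =>
    match pvLookupA partidos (e.1, e.2.1) with
    | none => puntos   -- unreachable: the iterated key is in the dict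
    | some (_, resultado) =>
      match resultado with
      | none => puntos
      | some (gl, gv) =>
        if equipo = e.1 then
          if gl > gv then puntos + 3 else if gl = gv then puntos + 1 else puntos
        else if equipo = e.2.1 then
          if gl < gv then puntos + 3 else if gl = gv then puntos + 1 else puntos
        else puntos) 0

def calcular_diferencia (partidos : List (String × String × Int × (Option (Int × Int))))
    (equipo : String) : Int :=
  partidos.foldl (fun diferencia e =>
    match pvLookupA partidos (e.1, e.2.1) with
    | none => diferencia   -- unreachable
    | some (_, resultado) =>
      match resultado with
      | none => diferencia
      | some (gl, gv) =>
        if equipo = e.1 then diferencia + (gl - gv)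
        else if equipo = e.2.1 then diferencia + (gv - gl)
        else diferencia) 0

def ordenar_equipos (partidos : List (String × String × Int × (Option (Int × Int)))) : List String :=
  let equipos := obtener_equipos partidos
  let estadisticas := equipos.foldl (fun acc equipo =>
    acc ++ [(calcular_puntos partidos equipo, calcular_diferencia partidos equipo, equipo)]) []
  -- estadisticas.sort(): Python compares the (int, int, str) triples lexicographically
  let est := PySem.List.sorted estadisticas (fun t => toLex (t.1, toLex (t.2.1, t.2.2))) false
  let est := est.reverse
  est.foldl (fun acc t => acc ++ [t.2.2]) []

-- ===== PORT B =====
-- one match of B's single pass: setdefault both teams, then add this match's (points, diff) deltas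
def pvAltStep (stats : PySem.Dict String (Int × Int))
    (e : String × String × Int × (Option (Int × Int))) : PySem.Dict String (Int × Int) :=
  let stats := stats.setdefault e.1 (0, 0)
  let stats := stats.setdefault e.2.1 (0, 0)
  match e.2.2.2 with
  | none => stats
  | some (gl, gv) =>
    let pdl := stats.getD e.1 (0, 0)     -- stats[local] (key present after setdefault)
    let pdv := stats.getD e.2.1 (0, 0)   -- stats[visita]
    let pp := if gl > gv then (pdl.1 + 3, pdv.1)
      else if gl < gv then (pdl.1, pdv.1 + 3)
      else (pdl.1 + 1, pdv.1 + 1)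
    let stats := stats.insert e.1 (pp.1, pdl.2 + gl - gv)
    stats.insert e.2.1 (pp.2, pdv.2 + gv - gl)

def ordenar_equipos_alt (partidos : List (String × String × Int × (Option (Int × Int)))) : List String :=
  let stats := partidos.foldl pvAltStep PySem.Dict.empty
  -- sorted(stats, key=lambda e: (stats[e][0], stats[e][1], e), reverse=True);
  -- stats[e] on a key of stats is getD (key present), tuple key compared lexicographically
  PySem.List.sorted stats.keys
    (fun e => toLex ((stats.getD e (0, 0)).1, toLex ((stats.getD e (0, 0)).2, e))) true

-- ===== PRECONDITION & SPEC =====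
-- Pre_ excludes assoc lists with duplicate (local, visita) keys, which do not represent a Python
-- dict, and degenerate fixtures where a team plays itself with a recorded result — a corner no
-- tournament specifies, on which A's elif credits the match to the home role only while B credits
-- both roles.
def Pre_ordenar_equipos (partidos : List (String × String × Int × (Option (Int × Int)))) : Prop :=
  (partidos.map (fun e => (e.1, e.2.1))).Nodup ∧
    ∀ e ∈ partidos, e.2.2.2 ≠ none → e.1 ≠ e.2.1
instance (partidos : List (String × String × Int × (Option (Int × Int)))) : Decidable (Pre_ordenar_equipos partidos) := by unfold Pre_ordenar_equipos; infer_instance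

def pvWitness_ordenar_equipos : (List (String × String × Int × (Option (Int × Int)))) :=
  [("a", "b", 1, some (2, 1)), ("b", "a", 2, none)]

def Spec_ordenar_equipos (partidos : List (String × String × Int × (Option (Int × Int)))) (out : List String) : Prop := out = ordenar_equipos_alt partidos
instance (partidos : List (String × String × Int × (Option (Int × Int)))) (out : List String) : Decidable (Spec_ordenar_equipos partidos out) := by unfold Spec_ordenar_equipos; infer_instance

-- ===== CLAIM (what is proved, stated in full; the proofs are below) =====
def Claim_equal_ordenar_equipos : Prop := ∀ (partidos : List (String × String × Int × (Option (Int × Int)))), Dom_ordenar_equipos partidos → Pre_ordenar_equipos partidos → Spec_ordenar_equipos partidos (ordenar_equipos partidos)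

-- ===== LEMMAS AND PROOFS =====

-- per-match contributions of one match e to team q (A's elif shape; exact also for B when e.1 ≠ e.2.1)
def pvCP (q : String) (e : String × String × Int × (Option (Int × Int))) : Int :=
  match e.2.2.2 with
  | none => 0
  | some (gl, gv) =>
    if q = e.1 then (if gl > gv then 3 else if gl = gv then 1 else 0)
    else if q = e.2.1 then (if gl < gv then 3 else if gl = gv then 1 else 0)
    else 0

def pvCD (q : String) (e : String × String × Int × (Option (Int × Int))) : Int :=
  match e.2.2.2 with
  | none => 0
  | some (gl, gv) =>
    if q = e.1 then gl - gv else if q = e.2.1 then gv - gl else 0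

theorem pv_find_self (l : List (String × String × Int × (Option (Int × Int))))
    (x : String × String × Int × (Option (Int × Int))) (hx : x ∈ l)
    (hnd : (l.map (fun e => (e.1, e.2.1))).Nodup) :
    l.find? (fun y => (y.1, y.2.1) == (x.1, x.2.1)) = some x := by
  induction l with
  | nil => cases hx
  | cons a t ih =>
    simp only [List.map_cons, List.nodup_cons] at hnd
    rcases List.mem_cons.mp hx with rfl | hxt
    · rw [List.find?_cons_of_pos (by simp)]
    · have hne : (a.1, a.2.1) ≠ (x.1, x.2.1) := by
        intro h
        exact hnd.1 (h ▸ List.mem_map_of_mem (f := fun e => (e.1, e.2.1)) hxt)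
      rw [List.find?_cons_of_neg (by simpa using hne)]
      exact ih hxt hnd.2

theorem pv_lookup_self (partidos : List (String × String × Int × (Option (Int × Int))))
    (e : String × String × Int × (Option (Int × Int))) (he : e ∈ partidos)
    (hnd : (partidos.map (fun e => (e.1, e.2.1))).Nodup) :
    pvLookupA partidos (e.1, e.2.1) = some e.2.2 := by
  unfold pvLookupA
  rw [pv_find_self partidos e he hnd]
  rfl

theorem pv_puntos_eq (partidos : List (String × String × Int × (Option (Int × Int))))
    (hnd : (partidos.map (fun e => (e.1, e.2.1))).Nodup) (q : String) :
    calcular_puntos partidos q = (partidos.map (pvCP q)).sum := by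
  unfold calcular_puntos
  refine Eq.trans (PySem.List.foldl_congr_mem _ _ (fun acc e => acc + pvCP q e) _ ?_) ?_
  · intro acc e he
    rw [pv_lookup_self partidos e he hnd]
    rcases e with ⟨l, v, f, r⟩
    cases r with
    | none => simp [pvCP]
    | some g =>
      rcases g with ⟨gl, gv⟩
      simp only [pvCP]
      split_ifs <;> omega
  · rw [PySem.List.foldl_add]
    ring

theorem pv_dif_eq (partidos : List (String × String × Int × (Option (Int × Int))))
    (hnd : (partidos.map (fun e => (e.1, e.2.1))).Nodup) (q : String) :
    calcular_diferencia partidos q = (partidos.map (pvCD q)).sum := by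
  unfold calcular_diferencia
  refine Eq.trans (PySem.List.foldl_congr_mem _ _ (fun acc e => acc + pvCD q e) _ ?_) ?_
  · intro acc e he
    rw [pv_lookup_self partidos e he hnd]
    rcases e with ⟨l, v, f, r⟩
    cases r with
    | none => simp [pvCD]
    | some g =>
      rcases g with ⟨gl, gv⟩
      simp only [pvCD]
      split_ifs <;> omega
  · rw [PySem.List.foldl_add]
    ring

theorem pv_getD_setdefault (d : PySem.Dict String (Int × Int)) (k e : String) :
    (d.setdefault k (0, 0)).getD e (0, 0) = d.getD e (0, 0) := by
  by_cases h : e = k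
  · subst h
    rw [PySem.Dict.getD_eq_get?_getD, PySem.Dict.get?_setdefault_self,
        PySem.Dict.getD_eq_get?_getD]
    cases d.get? e <;> rfl
  · rw [PySem.Dict.getD_eq_get?_getD, PySem.Dict.get?_setdefault_of_ne _ _ h,
        PySem.Dict.getD_eq_get?_getD]

theorem pv_step_getD (d : PySem.Dict String (Int × Int))
    (e : String × String × Int × (Option (Int × Int))) (hne : e.2.2.2 ≠ none → e.1 ≠ e.2.1)
    (q : String) :
    (pvAltStep d e).getD q (0, 0)
      = ((d.getD q (0, 0)).1 + pvCP q e, (d.getD q (0, 0)).2 + pvCD q e) := by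
  rcases e with ⟨l, v, f, r⟩
  simp only at hne
  cases r with
  | none =>
    simp only [pvAltStep, pvCP, pvCD, pv_getD_setdefault]
    simp
  | some g =>
    rcases g with ⟨gl, gv⟩
    replace hne : l ≠ v := hne (by simp)
    simp only [pvAltStep, pvCP, pvCD, PySem.Dict.getD_insert, pv_getD_setdefault]
    by_cases hqv : q = v
    · subst hqv
      have hql : ¬ q = l := fun h => hne (h ▸ rfl)
      rw [if_pos rfl, if_neg hql, if_pos rfl, if_neg hql, if_pos rfl]
      simp only [Prod.mk.injEq]
      split_ifs <;> constructor <;> omega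
    · rw [if_neg hqv]
      by_cases hql : q = l
      · subst hql
        rw [if_pos rfl, if_pos rfl, if_pos rfl]
        simp only [Prod.mk.injEq]
        split_ifs <;> constructor <;> omega
      · rw [if_neg hql, if_neg hql, if_neg hqv, if_neg hql, if_neg hqv]
        simp

theorem pv_fold_getD (l : List (String × String × Int × (Option (Int × Int))))
    (d : PySem.Dict String (Int × Int)) (hs : ∀ e ∈ l, e.2.2.2 ≠ none → e.1 ≠ e.2.1) (q : String) :
    (l.foldl pvAltStep d).getD q (0, 0)
      = ((d.getD q (0, 0)).1 + (l.map (pvCP q)).sum,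
         (d.getD q (0, 0)).2 + (l.map (pvCD q)).sum) := by
  induction l generalizing d with
  | nil => simp
  | cons a t ih =>
    simp only [List.foldl_cons, List.map_cons, List.sum_cons]
    rw [ih _ (fun e he => hs e (List.mem_cons_of_mem a he)),
        pv_step_getD d a (hs a (List.mem_cons_self)) q]
    simp only [Prod.mk.injEq]
    constructor <;> ring

theorem pv_step_mem_keys (d : PySem.Dict String (Int × Int))
    (e : String × String × Int × (Option (Int × Int))) (q : String) :
    q ∈ (pvAltStep d e).keys ↔ q = e.1 ∨ q = e.2.1 ∨ q ∈ d.keys := by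
  rcases e with ⟨l, v, f, r⟩
  cases r with
  | none =>
    simp only [pvAltStep, ← PySem.Dict.contains_iff_mem_keys, PySem.Dict.contains_setdefault]
    simp only [Bool.or_eq_true, beq_iff_eq]
    tauto
  | some g =>
    rcases g with ⟨gl, gv⟩
    simp only [pvAltStep, ← PySem.Dict.contains_iff_mem_keys, PySem.Dict.contains_insert,
      PySem.Dict.contains_setdefault]
    simp only [Bool.or_eq_true, beq_iff_eq]
    tauto

theorem pv_fold_mem_keys (l : List (String × String × Int × (Option (Int × Int))))
    (d : PySem.Dict String (Int × Int)) (q : String) :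
    q ∈ (l.foldl pvAltStep d).keys ↔ q ∈ d.keys ∨ ∃ e ∈ l, q = e.1 ∨ q = e.2.1 := by
  induction l generalizing d with
  | nil => simp
  | cons a t ih =>
    simp only [List.foldl_cons]
    rw [ih, pv_step_mem_keys]
    constructor
    · rintro ((h | h | h) | ⟨e, he, hq⟩)
      · exact Or.inr ⟨a, List.mem_cons_self, Or.inl h⟩
      · exact Or.inr ⟨a, List.mem_cons_self, Or.inr h⟩
      · exact Or.inl h
      · exact Or.inr ⟨e, List.mem_cons_of_mem a he, hq⟩
    · rintro (h | ⟨e, he, hq⟩)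
      · exact Or.inl (Or.inr (Or.inr h))
      · rcases List.mem_cons.mp he with rfl | he'
        · rcases hq with h | h
          · exact Or.inl (Or.inl h)
          · exact Or.inl (Or.inr (Or.inl h))
        · exact Or.inr ⟨e, he', hq⟩

theorem pv_step_nodup (d : PySem.Dict String (Int × Int))
    (e : String × String × Int × (Option (Int × Int))) (h : d.keys.Nodup) :
    (pvAltStep d e).keys.Nodup := by
  rcases e with ⟨l, v, f, r⟩
  have hsd : ∀ (d : PySem.Dict String (Int × Int)) (k : String), d.keys.Nodup →
      (d.setdefault k (0, 0)).keys.Nodup := by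
    intro d k hd
    by_cases hc : d.contains k
    · rw [PySem.Dict.setdefault_of_contains _ _ hc]; exact hd
    · rw [PySem.Dict.setdefault_of_not_contains _ _ (by simpa using hc)]
      exact PySem.Dict.nodup_keys_insert _ _ _ hd
  cases r with
  | none => exact hsd _ _ (hsd _ _ h)
  | some g =>
    rcases g with ⟨gl, gv⟩
    simp only [pvAltStep]
    exact PySem.Dict.nodup_keys_insert _ _ _ (PySem.Dict.nodup_keys_insert _ _ _
      (hsd _ _ (hsd _ _ h)))

theorem pv_mem_equipos (partidos : List (String × String × Int × (Option (Int × Int))))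
    (q : String) :
    q ∈ obtener_equipos partidos ↔ ∃ e ∈ partidos, q = e.1 ∨ q = e.2.1 := by
  unfold obtener_equipos
  rw [PySem.List.mem_sorted]
  have : ∀ (s : PySem.Set String),
      q ∈ partidos.foldl (fun s e => PySem.Set.add (PySem.Set.add s e.1) e.2.1) s ↔
        q ∈ s ∨ ∃ e ∈ partidos, q = e.1 ∨ q = e.2.1 := by
    intro s
    induction partidos generalizing s with
    | nil => simp
    | cons a t ih =>
      simp only [List.foldl_cons]
      rw [ih, PySem.Set.mem_add, PySem.Set.mem_add]
      constructor
      · rintro (((h | h) | h) | ⟨e, he, hq⟩)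
        · exact Or.inl h
        · exact Or.inr ⟨a, List.mem_cons_self, Or.inl h⟩
        · exact Or.inr ⟨a, List.mem_cons_self, Or.inr h⟩
        · exact Or.inr ⟨e, List.mem_cons_of_mem a he, hq⟩
      · rintro (h | ⟨e, he, hq⟩)
        · exact Or.inl (Or.inl (Or.inl h))
        · rcases List.mem_cons.mp he with rfl | he'
          · rcases hq with h | h
            · exact Or.inl (Or.inl (Or.inr h))
            · exact Or.inl (Or.inr h)
          · exact Or.inr ⟨e, he', hq⟩
  rw [this]
  simp [PySem.Set.empty]

theorem pv_set_add_nodup {α : Type} [BEq α] [LawfulBEq α] (s : PySem.Set α) (x : α)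
    (h : List.Nodup s) : List.Nodup (PySem.Set.add s x) := by
  unfold PySem.Set.add
  split
  · exact h
  · rename_i hc
    simp only [List.nodup_append, List.nodup_cons, List.nodup_nil]
    refine ⟨h, ⟨by simp, by simp⟩, ?_⟩
    intro a ha b hb
    simp only [List.mem_singleton] at hb
    subst hb
    intro hab
    subst hab
    exact absurd (by simpa [PySem.Set.contains] using List.elem_eq_true_of_mem ha) (by simpa using hc)

theorem pv_equipos_nodup (partidos : List (String × String × Int × (Option (Int × Int)))) :
    (obtener_equipos partidos).Nodup := by
  unfold obtener_equipos
  refine ((PySem.List.sorted_perm _ _ _).nodup_iff).mpr ?_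
  have : ∀ (s : PySem.Set String), List.Nodup s →
      List.Nodup (partidos.foldl (fun s e => PySem.Set.add (PySem.Set.add s e.1) e.2.1) s) := by
    intro s hs
    induction partidos generalizing s with
    | nil => exact hs
    | cons a t ih => exact ih _ (pv_set_add_nodup _ _ (pv_set_add_nodup _ _ hs))
  exact this _ (by simp [PySem.Set.empty])

theorem pv_fold_nodup (l : List (String × String × Int × (Option (Int × Int))))
    (d : PySem.Dict String (Int × Int)) (h : d.keys.Nodup) :
    (l.foldl pvAltStep d).keys.Nodup := by
  induction l generalizing d with
  | nil => exact h
  | cons a t ih => exact ih _ (pv_step_nodup d a h)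

-- ===== VERDICT (by name: the statement is the Claim_ definition above) =====
theorem ordenar_equipos_spec : Claim_equal_ordenar_equipos := by
  intro partidos _hDom hPre
  obtain ⟨hnd, hself⟩ := hPre
  unfold Spec_ordenar_equipos ordenar_equipos ordenar_equipos_alt
  simp only [PySem.List.foldl_append_singleton_eq_map, List.nil_append]
  set d := partidos.foldl pvAltStep PySem.Dict.empty with hd
  set kB : String → Lex (Int × Lex (Int × String)) :=
    fun e => toLex ((d.getD e (0, 0)).1, toLex ((d.getD e (0, 0)).2, e)) with hkB
  set K3 : (Int × Int × String) → Lex (Int × Lex (Int × String)) :=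
    fun t => toLex (t.1, toLex (t.2.1, t.2.2)) with hK3
  set f : String → Int × Int × String :=
    fun equipo => (calcular_puntos partidos equipo, calcular_diferencia partidos equipo, equipo)
    with hf
  set equipos := obtener_equipos partidos with heq
  -- the two computations of a team's statistics agree
  have hGet : ∀ q : String, d.getD q (0, 0)
      = ((partidos.map (pvCP q)).sum, (partidos.map (pvCD q)).sum) := by
    intro q
    rw [hd, pv_fold_getD partidos PySem.Dict.empty hself q]
    simp
  have hK : ∀ q : String, K3 (f q) = kB q := by
    intro q
    simp only [hf, hK3, hkB, hGet q, pv_puntos_eq partidos hnd q, pv_dif_eq partidos hnd q]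
  have hndB : d.keys.Nodup := pv_fold_nodup _ _ (by simp)
  -- membership in sorted A-list
  have hmemS : ∀ t ∈ PySem.List.sorted (equipos.map f) K3 false, kB t.2.2 = K3 t := by
    intro t ht
    rw [PySem.List.mem_sorted] at ht
    obtain ⟨q, _, rfl⟩ := List.mem_map.mp ht
    exact (hK q).symm
  -- the permutation
  have hperm : ((PySem.List.sorted (equipos.map f) K3 false).reverse.map (fun t => t.2.2)).Perm
      (PySem.List.sorted d.keys kB true) := by
    have h1 : (PySem.List.sorted (equipos.map f) K3 false).reverse.Perm (equipos.map f) :=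
      (List.reverse_perm _).trans (PySem.List.sorted_perm _ _ _)
    have h2 : ((equipos.map f).map (fun t : Int × Int × String => t.2.2)) = equipos := by
      simp [hf, List.map_map, Function.comp_def]
    have h3 : equipos.Perm d.keys := by
      rw [List.perm_ext_iff_of_nodup (pv_equipos_nodup partidos) hndB]
      intro q
      rw [pv_mem_equipos, hd, pv_fold_mem_keys]
      simp
    exact (h2 ▸ h1.map (fun t : Int × Int × String => t.2.2)).trans
      (h3.trans (PySem.List.sorted_perm d.keys kB true).symm)
  -- both lists are sorted strictly the same way: descending in kB (as ascending in the dual order)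
  have hPA : ((PySem.List.sorted (equipos.map f) K3 false).reverse.map
      (fun t => t.2.2)).Pairwise
      (fun a b => OrderDual.toDual (kB a) ≤ OrderDual.toDual (kB b)) := by
    rw [List.pairwise_map]
    rw [List.pairwise_reverse]
    exact (PySem.List.sorted_pairwise (equipos.map f) K3).imp_of_mem
      (fun ha hb hr => by
        rw [OrderDual.toDual_le_toDual, hmemS _ ha, hmemS _ hb]; exact hr)
  have hPB : (PySem.List.sorted d.keys kB true).Pairwise
      (fun a b => OrderDual.toDual (kB a) ≤ OrderDual.toDual (kB b)) := by
    exact (PySem.List.sorted_pairwise_rev d.keys kB).imp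
      (fun h => OrderDual.toDual_le_toDual.mpr h)
  have hinj : Function.Injective (fun e => OrderDual.toDual (kB e)) := by
    intro a b h
    have h2 : kB a = kB b := OrderDual.toDual.injective h
    have h3 := congrArg (fun z : Lex (Int × Lex (Int × String)) => (ofLex (ofLex z).2).2) h2
    simpa [hkB] using h3
  exact PySem.List.eq_of_perm_of_pairwise_le_of_injective _ hinj hperm hPA hPB
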